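-- pv_equiv track=rewrite | github.com/AP-MI-2021/lab-2-AverageLinuxEnjoyer | main.py | is_antipalindrome
-- ===== SOURCE A (Python) =====
-- def reverse(x: int) -> int:
--     """Returneaza un numar scris invers
--
--     Args:
--         x (int): Numarul care urmeaza a fi inversat
--
--     Returns:
--         int: Numarul inversat
--     """
--     y = 0
--     while x:
--         y *= 10
--         y += x % 10
--         x //= 10
--
--     return y
--
-- def is_antipalindrome(n: int) -> bool:
--     """Verifica daca un numar este antipalindrom. Un numar este antipalindrom daca oricare dooua cifre egal departate de extremitati sunt diferite.
--
--     Args: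
--         n (int): Numarul verificat
--
--     Returns:
--         bool: Daca este sau nu antipalindrom
--     """
--
--     rev = reverse(n)
--     for i in range(len(str(n)) // 2):
--         if n%10==rev%10:
--             return False
--
--         n//=10
--         rev//=10
--
--     return True
-- ===== SOURCE B (Python) =====
-- def is_antipalindrome(n: int) -> bool:
--     """Verifica daca un numar este antipalindrom: oricare doua cifre egal
--     departate de extremitati sunt diferite."""
--     s = str(n)
--     return all(a != b for a, b in zip(s[:len(s) // 2], reversed(s)))
-- ===== Notes on version B (the rewrite author's own statement) =====
-- stated objective: simpler
-- what changed: B converts the number to its decimal string once and checks that every character in the first half differs from its mirror via zip with the reversed string, eliminating A's arithmetic reversal pass and the per-step integer division/modulo digit stripping.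
-- outside the precondition, e.g. on is_antipalindrome(-1): A does not finish within the time limit, B returns True
import Mathlib
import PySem

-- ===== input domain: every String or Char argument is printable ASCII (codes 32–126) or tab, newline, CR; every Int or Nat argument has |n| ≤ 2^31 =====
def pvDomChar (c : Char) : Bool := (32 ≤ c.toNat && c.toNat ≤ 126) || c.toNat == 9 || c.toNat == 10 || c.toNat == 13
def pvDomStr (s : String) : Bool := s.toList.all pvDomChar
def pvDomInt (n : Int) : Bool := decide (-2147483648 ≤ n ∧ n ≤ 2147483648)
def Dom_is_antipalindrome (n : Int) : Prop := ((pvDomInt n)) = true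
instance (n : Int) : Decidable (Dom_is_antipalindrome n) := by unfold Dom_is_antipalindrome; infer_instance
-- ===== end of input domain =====

-- B checks mirror character pairs of str(n) via zip with the reversed string instead of A's
-- arithmetic digit reversal and per-step digit stripping; objective: simpler (return value only).

-- ===== PORT A =====
-- `while x:` of reverse(); the guard `0 < x` makes the loop total in Lean: for x ≥ 0 it is
-- exactly Python's condition (for x < 0 Python's loop never terminates — excluded by Pre_).
def pvRevLoop (x y : Int) : Int :=
  if h : 0 < x then pvRevLoop (PySem.Int.floordiv x 10) (y * 10 + PySem.Int.mod x 10) else y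
termination_by x.toNat
decreasing_by
  rw [PySem.Int.floordiv_eq_ediv_of_pos (by norm_num)]
  omega

def pvReverse (x : Int) : Int := pvRevLoop x 0

-- the `for i in range(len(str(n)) // 2)` loop of A, with its early `return False`
def pvALoop : Nat → Int → Int → Bool
  | 0, _, _ => true
  | Nat.succ k, n, rev =>
    if PySem.Int.mod n 10 == PySem.Int.mod rev 10 then false
    else pvALoop k (PySem.Int.floordiv n 10) (PySem.Int.floordiv rev 10)

def is_antipalindrome (n : Int) : Bool :=
  let rev := pvReverse n
  pvALoop ((PySem.Int.floordiv (PySem.Str.len (PySem.Int.toStr n)) 2).toNat) n rev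

-- ===== PORT B =====
-- s = str(n); all(a != b for a, b in zip(s[:len(s)//2], reversed(s)))
def is_antipalindrome_alt (n : Int) : Bool :=
  let s := PySem.Int.toChars n
  ((PySem.List.slice s none (some (PySem.Int.floordiv (PySem.List.len s) 2))).zip s.reverse).all
    (fun p => p.1 != p.2)

-- ===== PRECONDITION & SPEC =====
-- Pre_ excludes exactly the negative n, on which A never returns: reverse()'s `x //= 10`
-- stabilises at -1, so its `while x:` loop runs forever.
def Pre_is_antipalindrome (n : Int) : Prop := 0 ≤ n
instance (n : Int) : Decidable (Pre_is_antipalindrome n) := by unfold Pre_is_antipalindrome; infer_instance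

def pvWitness_is_antipalindrome : Int := 13

def Spec_is_antipalindrome (n : Int) (out : Bool) : Prop := out = is_antipalindrome_alt n
instance (n : Int) (out : Bool) : Decidable (Spec_is_antipalindrome n out) := by unfold Spec_is_antipalindrome; infer_instance

-- ===== CLAIM (what is proved, stated in full; the proofs are below) =====
def Claim_equal_is_antipalindrome : Prop := ∀ (n : Int), Dom_is_antipalindrome n → Pre_is_antipalindrome n → Spec_is_antipalindrome n (is_antipalindrome n)

-- ===== LEMMAS AND PROOFS =====

-- core's Nat.toDigits (what str(n) prints) is the reversed decimal digit list, for n > 0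
lemma pvToDigitsCore_eq (f : Nat) : ∀ (n : Nat) (l : List Char), n < 10 ^ f → 0 < n →
    Nat.toDigitsCore 10 f n l = ((Nat.digits 10 n).map Nat.digitChar).reverse ++ l := by
  induction f with
  | zero => intro n l hf hn; omega
  | succ f ih =>
    intro n l hf hn
    rw [Nat.digits_def' (by norm_num : 1 < 10) hn]
    simp only [Nat.toDigitsCore, List.map_cons, List.reverse_cons]
    by_cases h0 : n / 10 = 0
    · simp [h0]
    · rw [if_neg h0, ih (n / 10) _ (by rw [Nat.div_lt_iff_lt_mul (by norm_num)]; calc n < 10 ^ (f+1) := hf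
              _ = 10 ^ f * 10 := by ring) (Nat.pos_of_ne_zero h0)]
      simp

lemma pvToDigits_eq (n : Nat) (hn : 0 < n) :
    Nat.toDigits 10 n = ((Nat.digits 10 n).map Nat.digitChar).reverse := by
  have h : n < 10 ^ (n + 1) := by
    calc n < 10 ^ n := Nat.lt_pow_self (by norm_num)
    _ ≤ 10 ^ (n + 1) := Nat.pow_le_pow_right (by norm_num) (by omega)
  simpa using pvToDigitsCore_eq (n + 1) n [] h hn

-- digit i (from the least significant end) of a number given by its digit list
lemma pvDigOfDigits : ∀ (l : List Nat), (∀ d ∈ l, d < 10) → ∀ (i : Nat),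
    Nat.ofDigits 10 l / 10 ^ i % 10 = l.getD i 0 := by
  intro l
  induction l with
  | nil => intro _ i; simp [Nat.ofDigits]
  | cons d t ih =>
    intro h i
    have hd : d < 10 := h d (by simp)
    rw [Nat.ofDigits_cons]
    cases i with
    | zero => simp only [pow_zero, Nat.div_one, List.getD_cons_zero]; omega
    | succ i =>
      have h10 : (10 : Nat) ^ (i + 1) = 10 * 10 ^ i := by ring
      rw [h10, ← Nat.div_div_eq_div_mul]
      have hdiv : ((d : Nat) + 10 * Nat.ofDigits 10 t) / 10 = Nat.ofDigits 10 t := by omega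
      rw [hdiv, List.getD_cons_succ]
      exact ih (fun e he => h e (by simp [he])) i

lemma pvDigSelf (m i : Nat) : m / 10 ^ i % 10 = (Nat.digits 10 m).getD i 0 := by
  conv_lhs => rw [← Nat.ofDigits_digits 10 m]
  exact pvDigOfDigits _ (fun d hd => Nat.digits_lt_base (by norm_num) hd) i

-- Int-level steps reduce to Nat steps
lemma pvModCast (a : Nat) : PySem.Int.mod (a : Int) 10 = ((a % 10 : Nat) : Int) := by
  rw [PySem.Int.mod_eq_emod_of_pos (by norm_num)]; omega

lemma pvDivCast (a : Nat) : PySem.Int.floordiv (a : Int) 10 = ((a / 10 : Nat) : Int) := by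
  rw [PySem.Int.floordiv_eq_ediv_of_pos (by norm_num)]; omega

lemma pvHalfCast (L : Nat) : PySem.Int.floordiv ((L : Nat) : Int) 2 = ((L / 2 : Nat) : Int) := by
  rw [PySem.Int.floordiv_eq_ediv_of_pos (by norm_num)]; omega

-- A's loop returns True iff every compared digit pair differs
lemma pvALoop_iff (k : Nat) : ∀ (a b : Nat),
    (pvALoop k (a : Int) (b : Int) = true ↔ ∀ i < k, a / 10 ^ i % 10 ≠ b / 10 ^ i % 10) := by
  induction k with
  | zero => intro a b; simp [pvALoop]
  | succ k ih =>
    intro a b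
    rw [show pvALoop (k+1) (a : Int) (b : Int) =
        (if PySem.Int.mod (a : Int) 10 == PySem.Int.mod (b : Int) 10 then false
         else pvALoop k (PySem.Int.floordiv (a : Int) 10) (PySem.Int.floordiv (b : Int) 10)) from rfl]
    rw [pvModCast, pvModCast, pvDivCast, pvDivCast]
    have hsplit : ∀ (x : Nat) (i : Nat), x / 10 ^ (i + 1) = x / 10 / 10 ^ i := by
      intro x i
      rw [Nat.div_div_eq_div_mul]
      congr 1
      ring
    by_cases he : a % 10 = b % 10
    · rw [if_pos (by rw [beq_iff_eq]; exact_mod_cast he)]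
      simp only [Bool.false_eq_true, false_iff]
      push Not
      exact ⟨0, by omega, by simpa using he⟩
    · rw [if_neg (by simp only [beq_iff_eq, Int.natCast_inj]; exact he), ih]
      constructor
      · intro h i hi
        cases i with
        | zero => simpa using he
        | succ i =>
          have hx := h i (by omega)
          rw [hsplit a i, hsplit b i]
          exact hx
      · intro h i hi
        have hx := h (i + 1) (by omega)
        rwa [hsplit a i, hsplit b i] at hx

-- the value reverse(n) computes, in terms of the digit list
lemma pvRevLoop_eq (m : Nat) : ∀ y : Int,
    pvRevLoop (m : Int) y =
      y * 10 ^ (Nat.digits 10 m).length + ((Nat.ofDigits 10 (Nat.digits 10 m).reverse : Nat) : Int) := by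
  induction m using Nat.strong_induction_on with
  | _ m ih =>
    intro y
    by_cases hm : 0 < m
    · rw [pvRevLoop.eq_def, dif_pos (by exact_mod_cast hm), pvDivCast, pvModCast,
        ih (m / 10) (Nat.div_lt_self hm (by norm_num)),
        Nat.digits_def' (by norm_num : 1 < 10) hm]
      simp only [List.length_cons, List.reverse_cons, Nat.ofDigits_append, Nat.ofDigits_singleton,
        List.length_reverse]
      push_cast
      ring
    · have hz : m = 0 := by omega
      subst hz
      rw [pvRevLoop.eq_def]
      simp

lemma pvDigitChar_inj (d e : Nat) (hd : d < 10) (he : e < 10) :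
    Nat.digitChar d = Nat.digitChar e ↔ d = e := by
  interval_cases d <;> interval_cases e <;> decide

-- all over a zip of equal-position pairs
lemma pvZipAllNe {α : Type} [DecidableEq α] (xs ys : List α) :
    ((xs.zip ys).all (fun p => p.1 != p.2) = true) ↔
      ∀ i, (h1 : i < xs.length) → (h2 : i < ys.length) → xs[i] ≠ ys[i] := by
  rw [List.all_eq_true]
  constructor
  · intro h i h1 h2
    have hm : (xs[i], ys[i]) ∈ xs.zip ys := by
      have hg : (xs.zip ys)[i]'(by simp [List.length_zip]; omega) = (xs[i], ys[i]) := by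
        simp [List.getElem_zip]
      rw [← hg]
      exact List.getElem_mem _
    simpa using h _ hm
  · intro h p hp
    obtain ⟨i, hi, hget⟩ := List.mem_iff_getElem.mp hp
    have h1 : i < xs.length := by simp [List.length_zip] at hi; omega
    have h2 : i < ys.length := by simp [List.length_zip] at hi; omega
    rw [← hget]
    simpa [List.getElem_zip] using h i h1 h2

-- ===== VERDICT (by name: the statement is the Claim_ definition above) =====
theorem is_antipalindrome_spec : Claim_equal_is_antipalindrome := by
  intro n _hDom hPre
  unfold Spec_is_antipalindrome
  have hn : (0 : Int) ≤ n := hPre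
  obtain ⟨m, rfl⟩ : ∃ m : Nat, n = (m : Int) := ⟨n.toNat, by omega⟩
  by_cases hm : 0 < m
  case neg =>
    have hz : m = 0 := by omega
    subst hz
    rfl
  case pos =>
    set ds := Nat.digits 10 m with hds
    set L := ds.length with hL
    have hchars : PySem.Int.toChars (m : Int) = (ds.map Nat.digitChar).reverse := by
      rw [show PySem.Int.toChars (m : Int) =
          (if (m : Int) < 0 then '-' :: Nat.toDigits 10 (m : Int).natAbs
           else Nat.toDigits 10 (m : Int).toNat) from rfl]
      rw [if_neg (by omega)]
      rw [Int.toNat_natCast]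
      exact pvToDigits_eq m hm
    have hlen : ((ds.map Nat.digitChar).reverse).length = L := by simp [hL]
    have hdlt : ∀ d ∈ ds, d < 10 := fun d hd => Nat.digits_lt_base (by norm_num) hd
    have hdltr : ∀ d ∈ ds.reverse, d < 10 := fun d hd => hdlt d (List.mem_reverse.mp hd)
    have hhle : L / 2 ≤ L := Nat.div_le_self _ _
    -- A's value
    have hA : is_antipalindrome (m : Int) = true ↔
        ∀ i < L / 2, ds.getD i 0 ≠ ds.reverse.getD i 0 := by
      rw [show is_antipalindrome (m : Int) =
          pvALoop ((PySem.Int.floordiv (PySem.Str.len (PySem.Int.toStr (m : Int))) 2).toNat)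
            (m : Int) (pvReverse (m : Int)) from rfl]
      have hslen : PySem.Str.len (PySem.Int.toStr (m : Int)) = ((L : Nat) : Int) := by
        rw [PySem.Str.len_eq, PySem.Int.toList_toStr, hchars, hlen]
      rw [hslen, pvHalfCast, Int.toNat_natCast]
      rw [show pvReverse (m : Int) = pvRevLoop (m : Int) 0 from rfl, pvRevLoop_eq m 0]
      rw [show (0 : Int) * 10 ^ (Nat.digits 10 m).length +
          ((Nat.ofDigits 10 (Nat.digits 10 m).reverse : Nat) : Int) =
          ((Nat.ofDigits 10 ds.reverse : Nat) : Int) by rw [← hds]; ring]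
      rw [pvALoop_iff]
      constructor
      · intro hall i hi
        have hx := hall i hi
        rwa [pvDigSelf, ← hds, pvDigOfDigits ds.reverse hdltr] at hx
      · intro hall i hi
        rw [pvDigSelf, ← hds, pvDigOfDigits ds.reverse hdltr]
        exact hall i hi
    -- B's value
    have hB : is_antipalindrome_alt (m : Int) = true ↔
        ∀ i < L / 2, ds.getD i 0 ≠ ds.reverse.getD i 0 := by
      rw [show is_antipalindrome_alt (m : Int) =
          ((PySem.List.slice (PySem.Int.toChars (m : Int)) none
              (some (PySem.Int.floordiv (PySem.List.len (PySem.Int.toChars (m : Int))) 2))).zip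
            (PySem.Int.toChars (m : Int)).reverse).all (fun p => p.1 != p.2) from rfl]
      rw [hchars]
      rw [show PySem.List.len ((ds.map Nat.digitChar).reverse) = ((L : Nat) : Int) by
        rw [PySem.List.len_eq, hlen]]
      rw [pvHalfCast, PySem.List.slice_to_natCast, List.reverse_reverse]
      rw [pvZipAllNe]
      have htlen : ((ds.map Nat.digitChar).reverse.take (L / 2)).length = L / 2 := by
        rw [List.length_take, hlen]
        omega
      constructor
      · intro hall i hi
        have h1 : i < ((ds.map Nat.digitChar).reverse.take (L / 2)).length := by rw [htlen]; exact hi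
        have h2 : i < (ds.map Nat.digitChar).length := by rw [List.length_map, ← hL]; omega
        have hx := hall i h1 h2
        simp only [List.getElem_take, List.getElem_reverse, List.getElem_map, List.length_map] at hx
        rw [List.getD_eq_getElem ds 0 (show i < ds.length by omega),
            List.getD_eq_getElem ds.reverse 0 (show i < ds.reverse.length by rw [List.length_reverse]; omega),
            List.getElem_reverse]
        intro heq
        exact hx (congrArg Nat.digitChar heq.symm)
      · intro hall i h1 h2
        rw [htlen] at h1
        have hx := hall i h1
        rw [List.getD_eq_getElem ds 0 (show i < ds.length by omega),
            List.getD_eq_getElem ds.reverse 0 (show i < ds.reverse.length by rw [List.length_reverse]; omega),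
            List.getElem_reverse] at hx
        simp only [List.getElem_take, List.getElem_reverse, List.getElem_map, List.length_map]
        intro heq
        rw [pvDigitChar_inj _ _ (hdlt _ (List.getElem_mem _)) (hdlt _ (List.getElem_mem _))] at heq
        exact hx heq.symm
    rw [Bool.eq_iff_iff, hA, hB]
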